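-- pv_equiv track=rewrite | github.com/dioptra-io/zeph | zeph/selectors/epsilon.py | compute_rank
-- ===== SOURCE A (Python) =====
-- from collections import Counter, OrderedDict, defaultdict
--
-- def compute_rank(subsets):
--     """Compute the prefixes rank per agent based on the discoveries."""
--     if subsets is None:
--         return
--
--     total_discoveries = set()
--     rank_per_agent = defaultdict(list)
--
--     for subset, discoveries in subsets.items():
--         total_discoveries.update(discoveries)
--
--     covered = set()
--
--     while covered != total_discoveries and subsets:
--         subset = max(subsets, key=lambda subset: len(subsets[subset] - covered))
--
--         rank_per_agent[subset[0]].append(subset[1])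
--         covered.update(subsets[subset])
--         del subsets[subset]
--
--     return rank_per_agent
-- ===== SOURCE B (Python) =====
-- def compute_rank(subsets):
--     """Compute the prefixes rank per agent based on the discoveries."""
--     if subsets is None:
--         return
--
--     # Work on a list of (key, still-uncovered-discoveries); instead of keeping a
--     # global 'covered' set, subtract each picked set from all remaining sets.
--     rem = list(subsets.items())
--     picked = []
--     while rem:
--         # first index with the largest remaining set (strict-> scan keeps the first)
--         bi = 0
--         bs = len(rem[0][1])
--         for i in range(1, len(rem)):
--             n = len(rem[i][1])
--             if n > bs:
--                 bi, bs = i, n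
--         if bs == 0:
--             break
--         key, s = rem.pop(bi)
--         picked.append(key)
--         rem = [(k2, s2 - s) for k2, s2 in rem]
--
--     rank = {}
--     for agent, prefix in picked:
--         rank.setdefault(agent, []).append(prefix)
--     return rank
-- ===== Notes on version B (the rewrite author's own statement) =====
-- stated objective: alternative
-- what changed: A rescans the untouched dict each round, recomputing every set-difference against a growing 'covered' set via max(key=...) and tracking termination by comparing covered to the precomputed total; B keeps a list of (key, still-uncovered-set) pairs, picks the first largest by a plain index scan, subtracts the picked set from the remaining (shrinking) sets, stops when the best is empty, and groups the picked keys per agent in a final pass (A also deletes picked entries from its dict argument in place; B does not mutate it).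
import Mathlib
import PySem

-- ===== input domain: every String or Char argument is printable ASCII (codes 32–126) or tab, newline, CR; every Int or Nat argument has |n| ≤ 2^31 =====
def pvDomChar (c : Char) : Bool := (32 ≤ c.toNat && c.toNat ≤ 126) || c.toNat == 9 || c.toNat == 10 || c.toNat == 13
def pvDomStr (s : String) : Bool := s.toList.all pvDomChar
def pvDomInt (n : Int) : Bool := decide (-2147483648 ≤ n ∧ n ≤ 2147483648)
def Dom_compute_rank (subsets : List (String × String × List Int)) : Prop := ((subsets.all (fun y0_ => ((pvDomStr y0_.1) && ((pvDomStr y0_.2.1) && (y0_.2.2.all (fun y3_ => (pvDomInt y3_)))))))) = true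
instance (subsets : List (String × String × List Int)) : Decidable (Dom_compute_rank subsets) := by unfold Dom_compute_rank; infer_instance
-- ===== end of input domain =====

-- B replaces A's rescan of the original sets against a growing `covered` set by eagerly
-- subtracting each picked set from the remaining sets (an alternative state maintenance,
-- same cost); equivalence is about the RETURN value only (A deletes the picked entries
-- from its dict argument in place, B does not mutate it).

-- materialisation of the Python `dict[tuple[str,str], set[int]]` argument (both ports
-- receive the same dict; duplicate keys in the literal list overwrite, values are sets)
def pvDictOf (subsets : List (String × String × List Int)) :
    PySem.Dict (String × String) (PySem.Set Int) :=
  subsets.foldl (fun d e => d.insert (e.1, e.2.1) (PySem.Set.ofList e.2.2)) PySem.Dict.empty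

-- ===== PORT A =====
-- the greedy while-loop of A: `while covered != total_discoveries and subsets:`;
-- fuel = number of dict entries (one entry is deleted per iteration, so it suffices)
def pvLoopA (fuel : Nat) (covered total : PySem.Set Int)
    (d : PySem.Dict (String × String) (PySem.Set Int))
    (rank : PySem.Dict String (List String)) : PySem.Dict String (List String) :=
  match fuel with
  | 0 => rank
  | fuel + 1 =>
    if !(PySem.Set.equal covered total) && !d.items.isEmpty then
      -- subset = max(subsets, key=lambda s: len(subsets[s] - covered))
      match PySem.List.max? d.keys
          (fun k => (PySem.Set.diff (d.getD k PySem.Set.empty) covered).length) with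
      | none => rank   -- unreachable (the guard ensures the dict is nonempty)
      | some k =>
          pvLoopA fuel (PySem.Set.update covered (d.getD k PySem.Set.empty)) total
            (d.erase k) (rank.modify k.1 [] (· ++ [k.2]))
    else rank

def compute_rank (subsets : List (String × String × List Int)) : List (String × List String) :=
  -- `if subsets is None: return` cannot fire: the argument is always a dict here
  let d := pvDictOf subsets
  -- for subset, discoveries in subsets.items(): total_discoveries.update(discoveries)
  let total := d.items.foldl (fun t kv => PySem.Set.update t kv.2) PySem.Set.empty
  (pvLoopA d.size PySem.Set.empty total d PySem.Dict.empty).items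

-- ===== PORT B =====
-- the strict-`>` scan of Source B: first index with the largest remaining set
def pvBestAux (t : List ((String × String) × PySem.Set Int)) (i bi bs : Nat) : Nat × Nat :=
  match t with
  | [] => (bi, bs)
  | e :: t' =>
    if bs < e.2.length then pvBestAux t' (i + 1) i e.2.length
    else pvBestAux t' (i + 1) bi bs

-- Source B's `while rem:` loop collecting the picked keys; fuel = length of rem (pop each turn)
def pvLoopB (fuel : Nat) (rem : List ((String × String) × PySem.Set Int))
    (picked : List (String × String)) : List (String × String) :=
  match fuel, rem with
  | 0, _ => picked
  | _, [] => picked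
  | fuel + 1, e :: t =>
    let r := pvBestAux t 1 0 e.2.length
    if r.2 = 0 then picked
    else
      match PySem.List.pop? (e :: t) (r.1 : Int) with
      | none => picked   -- unreachable (the scan index is in range)
      | some (q, rest) =>
          pvLoopB fuel (rest.map (fun p => (p.1, PySem.Set.diff p.2 q.2))) (picked ++ [q.1])

def compute_rank_alt (subsets : List (String × String × List Int)) : List (String × List String) :=
  let d := pvDictOf subsets
  let rem := d.items   -- rem = list(subsets.items())
  let picked := pvLoopB rem.length rem []
  -- for agent, prefix in picked: rank.setdefault(agent, []).append(prefix)
  (picked.foldl (fun r kp => r.modify kp.1 [] (· ++ [kp.2])) PySem.Dict.empty).items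

-- ===== PRECONDITION & SPEC =====
def Spec_compute_rank (subsets : List (String × String × List Int)) (out : List (String × List String)) : Prop := out = compute_rank_alt subsets
instance (subsets : List (String × String × List Int)) (out : List (String × List String)) : Decidable (Spec_compute_rank subsets out) := by unfold Spec_compute_rank; infer_instance

-- ===== CLAIM (what is proved, stated in full; the proofs are below) =====
def Claim_equal_compute_rank : Prop := ∀ (subsets : List (String × String × List Int)), Dom_compute_rank subsets → Spec_compute_rank subsets (compute_rank subsets)

-- ===== LEMMAS AND PROOFS =====

-- picked-accumulator of pvLoopB is a prefix
theorem pvLoopB_acc (fuel : Nat) : ∀ (rem : List ((String × String) × PySem.Set Int))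
    (picked : List (String × String)),
    pvLoopB fuel rem picked = picked ++ pvLoopB fuel rem [] := by
  induction fuel with
  | zero => intro rem picked; simp [pvLoopB]
  | succ fuel ih =>
    intro rem picked
    cases rem with
    | nil => simp [pvLoopB]
    | cons e t =>
      simp only [pvLoopB]
      by_cases h : (pvBestAux t 1 0 e.2.length).2 = 0
      · simp [h]
      · simp only [if_neg h]
        cases hp : PySem.List.pop? (e :: t) ((pvBestAux t 1 0 e.2.length).1 : Int) with
        | none => simp
        | some qr =>
          obtain ⟨q, rest⟩ := qr
          dsimp only
          rw [ih _ (picked ++ [q.1]), ih _ ([] ++ [q.1])]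
          simp

-- the scan agrees with Python's first-max `max?`
theorem pvBestAux_spec (t : List ((String × String) × PySem.Set Int)) :
    ∀ (pre : List ((String × String) × PySem.Set Int)) (m : (String × String) × PySem.Set Int)
      (bi : Nat), pre[bi]? = some m →
    ∃ q, (pre ++ t)[(pvBestAux t pre.length bi m.2.length).1]? = some q ∧
      (pvBestAux t pre.length bi m.2.length).2 = q.2.length ∧
      t.foldl (fun acc x => match acc with
        | none => some x
        | some m => if m.2.length < x.2.length then some x else some m) (some m) = some q := by
  induction t with
  | nil =>
    intro pre m bi h
    exact ⟨m, by simpa [pvBestAux] using h, rfl, rfl⟩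
  | cons x t' ih =>
    intro pre m bi h
    obtain ⟨hbi, -⟩ := List.getElem?_eq_some_iff.mp h
    simp only [pvBestAux, List.foldl_cons]
    by_cases hc : m.2.length < x.2.length
    · simp only [if_pos hc]
      have hx : (pre ++ [x])[pre.length]? = some x := List.getElem?_concat_length
      have hlen : pre.length + 1 = (pre ++ [x]).length := by
        simp only [List.length_append, List.length_cons, List.length_nil]
      rw [hlen]
      obtain ⟨q, hq1, hq2, hq3⟩ := ih (pre ++ [x]) x pre.length hx
      refine ⟨q, ?_, hq2, hq3⟩
      rw [List.append_cons]; exact hq1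
    · simp only [if_neg hc]
      have hm : (pre ++ [x])[bi]? = some m := by
        rw [List.getElem?_append_left hbi]; exact h
      have hlen : pre.length + 1 = (pre ++ [x]).length := by
        simp only [List.length_append, List.length_cons, List.length_nil]
      rw [hlen]
      obtain ⟨q, hq1, hq2, hq3⟩ := ih (pre ++ [x]) m bi hm
      refine ⟨q, ?_, hq2, hq3⟩
      rw [List.append_cons]; exact hq1

-- max? commutes with map
theorem pvMax?_map {α β κ : Type} [LinearOrder κ] (g : α → β) (l : List α) (key : β → κ) :
    PySem.List.max? (l.map g) key = (PySem.List.max? l (fun x => key (g x))).map g := by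
  unfold PySem.List.max?
  rw [List.foldl_map]
  have h : ∀ (acc : Option α),
      l.foldl (fun acc x => match acc with
        | none => some (g x)
        | some m => if key m < key (g x) then some (g x) else some m) (acc.map g)
      = (l.foldl (fun acc x => match acc with
        | none => some x
        | some m => if key (g m) < key (g x) then some x else some m) acc).map g := by
    induction l with
    | nil => intro acc; rfl
    | cons x t ih =>
      intro acc
      simp only [List.foldl_cons]
      cases acc with
      | none => exact ih (some x)
      | some m =>
        simp only [Option.map_some]
        by_cases hc : key (g m) < key (g x) <;> simp only [hc, if_true, if_false]
        · exact ih (some x)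
        · exact ih (some m)
  exact h none

theorem pvMax?_congr_aux {α κ : Type} [LinearOrder κ] (l : List α) (k1 k2 : α → κ)
    (h : ∀ x ∈ l, k1 x = k2 x) : ∀ (acc : Option α), (∀ y, acc = some y → k1 y = k2 y) →
      l.foldl (fun acc x => match acc with
        | none => some x
        | some m => if k1 m < k1 x then some x else some m) acc
      = l.foldl (fun acc x => match acc with
        | none => some x
        | some m => if k2 m < k2 x then some x else some m) acc := by
  induction l with
  | nil => intro acc _; rfl
  | cons x t ih =>
    intro acc hacc
    have hx : k1 x = k2 x := h x (List.mem_cons_self)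
    have ht : ∀ y ∈ t, k1 y = k2 y := fun y hy => h y (List.mem_cons_of_mem _ hy)
    simp only [List.foldl_cons]
    cases acc with
    | none => exact ih ht (some x) (by intro y hy; simp at hy; subst hy; exact hx)
    | some m =>
      have hm : k1 m = k2 m := hacc m rfl
      simp only [hm, hx]
      by_cases hc : k2 m < k2 x
      · simp only [if_pos hc]
        exact ih ht (some x) (by intro y hy; simp at hy; subst hy; exact hx)
      · simp only [if_neg hc]
        exact ih ht (some m) (by intro y hy; simp at hy; subst hy; exact hm)

-- max? only looks at the key values of members
theorem pvMax?_congr {α κ : Type} [LinearOrder κ] (l : List α) (k1 k2 : α → κ)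
    (h : ∀ x ∈ l, k1 x = k2 x) : PySem.List.max? l k1 = PySem.List.max? l k2 := by
  unfold PySem.List.max?
  exact pvMax?_congr_aux l k1 k2 h none (by simp)

-- with unique keys, erasing a key removes exactly its position
theorem pvFilter_eraseIdx {ν : Type} (l : List ((String × String) × ν)) (i : Nat)
    (w : (String × String) × ν) (hnd : (l.map (·.1)).Nodup) (hi : l[i]? = some w) :
    l.filter (fun p => !(p.1 == w.1)) = l.eraseIdx i := by
  induction l generalizing i with
  | nil => simp at hi
  | cons x t ih =>
    simp only [List.map_cons, List.nodup_cons] at hnd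
    cases i with
    | zero =>
      simp only [List.getElem?_cons_zero, Option.some.injEq] at hi
      subst hi
      rw [List.filter_cons, if_neg (by simp), List.eraseIdx_zero, List.tail_cons]
      apply List.filter_eq_self.mpr
      intro p hp
      have : p.1 ≠ x.1 := fun he => hnd.1 (he ▸ List.mem_map_of_mem hp)
      simpa using this
    | succ i =>
      simp only [List.getElem?_cons_succ] at hi
      have hwmem : w ∈ t := by
        have := List.getElem?_eq_some_iff.mp hi
        obtain ⟨hlt, he⟩ := this
        exact he ▸ List.getElem_mem hlt
      have hxne : x.1 ≠ w.1 := fun he => hnd.1 (he ▸ List.mem_map_of_mem hwmem)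
      rw [List.eraseIdx_cons_succ, List.filter_cons, if_pos (by simpa using hxne)]
      rw [ih i hnd.2 hi]

-- subtracting the picked set from an already-reduced set = reducing by the enlarged covered set
theorem pvDiff_update (w covered v : PySem.Set Int) :
    PySem.Set.diff (PySem.Set.diff w covered) (PySem.Set.diff v covered)
      = PySem.Set.diff w (PySem.Set.update covered v) := by
  simp only [PySem.Set.diff, List.filter_filter]
  apply List.filter_congr
  intro x _
  simp [PySem.Set.contains, List.mem_filter]
  by_cases h1 : x ∈ covered <;> by_cases h2 : x ∈ v <;> simp [h1, h2]

theorem pvDiff_nil (s : PySem.Set Int) : PySem.Set.diff s [] = s := by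
  simp [PySem.Set.diff, PySem.Set.contains]

-- covered == total  ↔  every remaining difference is empty (under the coverage invariant)
theorem pvEqual_iff (covered total : PySem.Set Int)
    (d : PySem.Dict (String × String) (PySem.Set Int))
    (htot : ∀ x : Int, x ∈ total ↔ x ∈ covered ∨ ∃ kv ∈ d.items, x ∈ kv.2) :
    PySem.Set.equal covered total = true ↔
      ∀ kv ∈ d.items, PySem.Set.diff kv.2 covered = [] := by
  have hsub : covered.issubset total = true := by
    rw [PySem.Set.issubset_iff]
    intro x hx; exact (htot x).mpr (Or.inl hx)
  constructor
  · intro he kv hkv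
    have ht : total.issubset covered = true := by
      simp only [PySem.Set.equal, Bool.and_eq_true] at he; exact he.2
    rw [PySem.Set.issubset_iff] at ht
    apply List.filter_eq_nil_iff.mpr
    intro x hx
    have : x ∈ covered := ht x ((htot x).mpr (Or.inr ⟨kv, hkv, hx⟩))
    simp [PySem.Set.contains, this]
  · intro hall
    simp only [PySem.Set.equal, Bool.and_eq_true]
    refine ⟨hsub, ?_⟩
    rw [PySem.Set.issubset_iff]
    intro x hx
    rcases (htot x).mp hx with h | ⟨kv, hkv, hxkv⟩
    · exact h
    · have := List.filter_eq_nil_iff.mp (hall kv hkv) x hxkv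
      simp [PySem.Set.contains] at this
      exact this

-- membership in the total_discoveries fold
theorem pvMem_total (items : List ((String × String) × PySem.Set Int)) :
    ∀ (s : PySem.Set Int) (x : Int),
    x ∈ items.foldl (fun t kv => PySem.Set.update t kv.2) s ↔
      x ∈ s ∨ ∃ kv ∈ items, x ∈ kv.2 := by
  induction items with
  | nil => simp
  | cons kv t ih =>
    intro s x
    simp only [List.foldl_cons, ih, PySem.Set.mem_update]
    constructor
    · rintro ((h | h) | ⟨p, hp, hx⟩)
      · exact Or.inl h
      · exact Or.inr ⟨kv, by simp, h⟩
      · exact Or.inr ⟨p, by simp [hp], hx⟩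
    · rintro (h | ⟨p, hp, hx⟩)
      · exact Or.inl (Or.inl h)
      · rcases List.mem_cons.mp hp with he | hm
        · exact Or.inl (Or.inr (he ▸ hx))
        · exact Or.inr ⟨p, hm, hx⟩

-- selecting, erasing and recursing: the two loops walk in lockstep
theorem pvLoop_eq (fuel : Nat) : ∀ (covered total : PySem.Set Int)
    (d : PySem.Dict (String × String) (PySem.Set Int))
    (rank : PySem.Dict String (List String)),
    d.keys.Nodup →
    (∀ x : Int, x ∈ total ↔ x ∈ covered ∨ ∃ kv ∈ d.items, x ∈ kv.2) →
    pvLoopA fuel covered total d rank =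
      (pvLoopB fuel (d.items.map (fun kv => (kv.1, PySem.Set.diff kv.2 covered))) []).foldl
        (fun r kp => r.modify kp.1 [] (· ++ [kp.2])) rank := by
  induction fuel with
  | zero => intro covered total d rank _ _; simp [pvLoopA, pvLoopB]
  | succ fuel ih =>
    intro covered total d rank hnd htot
    obtain ⟨items⟩ := d
    cases items with
    | nil => simp [pvLoopA, pvLoopB]
    | cons kv tl =>
      -- the scan of B and its agreement with Python's max?
      obtain ⟨q, hq1, hq2, hq3⟩ :=
        pvBestAux_spec (tl.map (fun kv => (kv.1, PySem.Set.diff kv.2 covered)))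
          [(kv.1, PySem.Set.diff kv.2 covered)] (kv.1, PySem.Set.diff kv.2 covered) 0 (by simp)
      simp only [List.length_cons, List.length_nil, List.singleton_append, Nat.zero_add] at hq1 hq2 hq3
      have hrem : ((PySem.Dict.mk (kv :: tl)).items.map
          (fun kv => (kv.1, PySem.Set.diff kv.2 covered)))
          = (kv.1, PySem.Set.diff kv.2 covered) :: tl.map (fun kv => (kv.1, PySem.Set.diff kv.2 covered)) := rfl
      have hmax : PySem.List.max?
          ((kv.1, PySem.Set.diff kv.2 covered) :: tl.map (fun kv => (kv.1, PySem.Set.diff kv.2 covered)))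
          (fun p => p.2.length) = some q := by
        unfold PySem.List.max?
        rw [List.foldl_cons]
        dsimp only
        convert hq3 using 2
        funext acc x
        cases acc <;> rfl
      cases hEq : PySem.Set.equal covered total with
      | true =>
        -- A's guard is false; B's best remaining size is 0, so both stop at once
        have hall := (pvEqual_iff covered total (PySem.Dict.mk (kv :: tl)) htot).mp hEq
        have hq0 : q.2 = [] := by
          have hqmem : q ∈ (kv.1, PySem.Set.diff kv.2 covered)
              :: tl.map (fun kv => (kv.1, PySem.Set.diff kv.2 covered)) := by
            exact List.mem_of_getElem? hq1
          rw [← hrem] at hqmem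
          obtain ⟨kv', hkv', rfl⟩ := List.mem_map.mp hqmem
          exact hall kv' hkv'
        simp only [pvLoopA, pvLoopB, hEq, Bool.not_true, Bool.false_and, hrem]
        rw [hq2, hq0]
        simp
      | false =>
        -- decompose q: the element of the original dict it came from
        obtain ⟨kv₀, hkv₀, hh⟩ : ∃ kv₀, (kv :: tl)[(pvBestAux
            (tl.map (fun kv => (kv.1, PySem.Set.diff kv.2 covered))) 1 0
            (PySem.Set.diff kv.2 covered).length).1]? = some kv₀
            ∧ (kv₀.1, PySem.Set.diff kv₀.2 covered) = q := by
          have := hq1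
          rw [← hrem] at this
          rw [List.getElem?_map] at this
          obtain ⟨kv₀, h1, h2⟩ := Option.map_eq_some_iff.mp this
          exact ⟨kv₀, h1, h2⟩
        have hkv₀mem : kv₀ ∈ kv :: tl := by
          obtain ⟨hlt, he⟩ := List.getElem?_eq_some_iff.mp hkv₀
          exact he ▸ List.getElem_mem hlt
        have hk1 : q.1 = kv₀.1 := by rw [← hh]
        have hk2 : q.2 = PySem.Set.diff kv₀.2 covered := by rw [← hh]
        -- B's best size is nonzero (otherwise covered == total)
        have hne : (pvBestAux (tl.map (fun kv => (kv.1, PySem.Set.diff kv.2 covered))) 1 0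
            (PySem.Set.diff kv.2 covered).length).2 ≠ 0 := by
          intro h0
          have hall : ∀ kv' ∈ (PySem.Dict.mk (kv :: tl)).items,
              PySem.Set.diff kv'.2 covered = [] := by
            intro kv' hm
            have hmem : (kv'.1, PySem.Set.diff kv'.2 covered) ∈ (kv.1, PySem.Set.diff kv.2 covered)
                :: tl.map (fun kv => (kv.1, PySem.Set.diff kv.2 covered)) := by
              rw [← hrem]
              exact List.mem_map_of_mem hm
            have hle := PySem.List.max?_isMax hmax _ hmem
            rw [← hq2, h0] at hle
            simpa using List.length_eq_zero_iff.mp (Nat.le_zero.mp hle)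
          have := (pvEqual_iff covered total (PySem.Dict.mk (kv :: tl)) htot).mpr hall
          rw [hEq] at this
          exact Bool.false_ne_true this
        -- A's max? picks exactly q.1
        have hfkey : ∀ p ∈ (kv.1, PySem.Set.diff kv.2 covered)
            :: tl.map (fun kv => (kv.1, PySem.Set.diff kv.2 covered)),
            (PySem.Set.diff ((PySem.Dict.mk (kv :: tl)).getD p.1 PySem.Set.empty) covered).length
              = p.2.length := by
          intro p hp
          rw [← hrem] at hp
          obtain ⟨kv', hkv', rfl⟩ := List.mem_map.mp hp
          have : (PySem.Dict.mk (kv :: tl)).getD kv'.1 PySem.Set.empty = kv'.2 := by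
            refine PySem.Dict.getD_of_mem_items _ ?_ hnd _
            rw [Prod.mk.eta]
            exact hkv'
          rw [this]
        have hAmax : PySem.List.max? (PySem.Dict.mk (kv :: tl)).keys
            (fun k => (PySem.Set.diff ((PySem.Dict.mk (kv :: tl)).getD k PySem.Set.empty) covered).length)
            = some q.1 := by
          have hkeys : (PySem.Dict.mk (kv :: tl)).keys
              = ((kv.1, PySem.Set.diff kv.2 covered)
                  :: tl.map (fun kv => (kv.1, PySem.Set.diff kv.2 covered))).map (·.1) := by
            show (kv :: tl).map (·.1) = _
            rw [← hrem, List.map_map]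
            rfl
          rw [hkeys, pvMax?_map]
          rw [pvMax?_congr _ _ _ hfkey, hmax]
          rfl
        -- both loops take one step with the same selected entry
        have hlt : (pvBestAux (tl.map (fun kv => (kv.1, PySem.Set.diff kv.2 covered))) 1 0
            (PySem.Set.diff kv.2 covered).length).1 < ((kv.1, PySem.Set.diff kv.2 covered)
            :: tl.map (fun kv => (kv.1, PySem.Set.diff kv.2 covered))).length :=
          (List.getElem?_eq_some_iff.mp hq1).1
        have hpop := PySem.List.pop?_natCast ((kv.1, PySem.Set.diff kv.2 covered)
            :: tl.map (fun kv => (kv.1, PySem.Set.diff kv.2 covered))) _ hlt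
        have hgetq : ((kv.1, PySem.Set.diff kv.2 covered)
            :: tl.map (fun kv => (kv.1, PySem.Set.diff kv.2 covered)))[(pvBestAux
            (tl.map (fun kv => (kv.1, PySem.Set.diff kv.2 covered))) 1 0
            (PySem.Set.diff kv.2 covered).length).1]'hlt = q := by
          have := List.getElem?_eq_some_iff.mp hq1
          exact this.2
        rw [hgetq] at hpop
        -- the erased dict's items are exactly the eraseIdx of the originals
        have herase : (PySem.Dict.mk (kv :: tl)).erase q.1
            = (PySem.Dict.mk ((kv :: tl).eraseIdx (pvBestAux
                (tl.map (fun kv => (kv.1, PySem.Set.diff kv.2 covered))) 1 0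
                (PySem.Set.diff kv.2 covered).length).1) :
              PySem.Dict (String × String) (PySem.Set Int)) := by
          have hf : (kv :: tl).filter (fun p => !(p.1 == q.1))
              = (kv :: tl).eraseIdx (pvBestAux
                (tl.map (fun kv => (kv.1, PySem.Set.diff kv.2 covered))) 1 0
                (PySem.Set.diff kv.2 covered).length).1 := by
            rw [hk1]
            exact pvFilter_eraseIdx (kv :: tl) _ kv₀ hnd hkv₀
          show PySem.Dict.mk ((kv :: tl).filter (fun p => !(p.1 == q.1))) = _
          rw [hf]
        -- the invariant survives the step
        have hperm := PySem.List.perm_cons_eraseIdx (kv :: tl) hkv₀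
        have htot' : ∀ x : Int, x ∈ total ↔ x ∈ PySem.Set.update covered kv₀.2
            ∨ ∃ kv' ∈ (kv :: tl).eraseIdx (pvBestAux
              (tl.map (fun kv => (kv.1, PySem.Set.diff kv.2 covered))) 1 0
              (PySem.Set.diff kv.2 covered).length).1, x ∈ kv'.2 := by
          intro x
          rw [htot x, PySem.Set.mem_update]
          constructor
          · rintro (hc | ⟨kv', hkv', hx⟩)
            · exact Or.inl (Or.inl hc)
            · rcases List.mem_cons.mp ((hperm.mem_iff).mpr hkv') with he | hm
              · exact Or.inl (Or.inr (he ▸ hx))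
              · exact Or.inr ⟨kv', hm, hx⟩
          · rintro ((hc | hx) | ⟨kv', hkv', hx⟩)
            · exact Or.inl hc
            · exact Or.inr ⟨kv₀, hkv₀mem, hx⟩
            · exact Or.inr ⟨kv', hperm.mem_iff.mp (List.mem_cons_of_mem _ hkv'), hx⟩
        have hnd' : (PySem.Dict.mk ((kv :: tl).eraseIdx (pvBestAux
            (tl.map (fun kv => (kv.1, PySem.Set.diff kv.2 covered))) 1 0
            (PySem.Set.diff kv.2 covered).length).1) :
            PySem.Dict (String × String) (PySem.Set Int)).keys.Nodup := by
          show (((kv :: tl).eraseIdx _).map (·.1)).Nodup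
          refine List.Nodup.sublist (List.Sublist.map _ (List.eraseIdx_sublist _ _)) hnd
        have hIH := ih (PySem.Set.update covered kv₀.2) total
          (PySem.Dict.mk ((kv :: tl).eraseIdx (pvBestAux
            (tl.map (fun kv => (kv.1, PySem.Set.diff kv.2 covered))) 1 0
            (PySem.Set.diff kv.2 covered).length).1))
          (rank.modify q.1.1 [] (· ++ [q.1.2])) hnd' htot'
        -- the reduced remaining lists coincide
        have hrem' : (((kv.1, PySem.Set.diff kv.2 covered)
              :: tl.map (fun kv => (kv.1, PySem.Set.diff kv.2 covered))).eraseIdx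
                (pvBestAux (tl.map (fun kv => (kv.1, PySem.Set.diff kv.2 covered))) 1 0
                  (PySem.Set.diff kv.2 covered).length).1).map
              (fun p => (p.1, PySem.Set.diff p.2 q.2))
            = ((kv :: tl).eraseIdx (pvBestAux
                (tl.map (fun kv => (kv.1, PySem.Set.diff kv.2 covered))) 1 0
                (PySem.Set.diff kv.2 covered).length).1).map
              (fun kv' => (kv'.1, PySem.Set.diff kv'.2 (PySem.Set.update covered kv₀.2))) := by
          rw [← hrem, List.eraseIdx_map, List.map_map]
          apply List.map_congr_left
          intro p _
          show (p.1, PySem.Set.diff (PySem.Set.diff p.2 covered) q.2) = _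
          rw [hk2, pvDiff_update]
        have hgetD : (PySem.Dict.mk (kv :: tl)).getD q.1 PySem.Set.empty = kv₀.2 := by
          rw [hk1]
          refine PySem.Dict.getD_of_mem_items _ ?_ hnd _
          rw [Prod.mk.eta]
          exact hkv₀mem
        -- now reduce both sides
        simp only [pvLoopA, hrem, pvLoopB]
        simp only [hEq, Bool.not_false, List.isEmpty_cons, Bool.and_self, hAmax,
          if_true]
        rw [if_neg hne, hpop]
        dsimp only
        rw [hrem', pvLoopB_acc, List.foldl_append, hgetD, herase]
        rw [hIH]
        rfl

-- ===== VERDICT (by name: the statement is the Claim_ definition above) =====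
theorem compute_rank_spec : Claim_equal_compute_rank := by
  intro subsets _
  unfold Spec_compute_rank compute_rank compute_rank_alt
  dsimp only
  have hnd : (pvDictOf subsets).keys.Nodup := by
    unfold pvDictOf
    exact PySem.Dict.nodup_keys_foldl_insert_key subsets (fun e => (e.1, e.2.1))
      (fun _ e => PySem.Set.ofList e.2.2) PySem.Dict.empty (by simp)
  have htot : ∀ x : Int,
      x ∈ ((pvDictOf subsets).items.foldl (fun t kv => PySem.Set.update t kv.2) PySem.Set.empty) ↔
        x ∈ (PySem.Set.empty : PySem.Set Int) ∨ ∃ kv ∈ (pvDictOf subsets).items, x ∈ kv.2 := by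
    intro x
    exact pvMem_total _ _ x
  rw [pvLoop_eq _ _ _ _ _ hnd htot]
  have hmapid : (pvDictOf subsets).items.map
      (fun kv => (kv.1, PySem.Set.diff kv.2 PySem.Set.empty)) = (pvDictOf subsets).items := by
    have h : ∀ kv ∈ (pvDictOf subsets).items,
        (kv.1, PySem.Set.diff kv.2 (PySem.Set.empty : PySem.Set Int)) = id kv := by
      intro kv _
      show (kv.1, PySem.Set.diff kv.2 []) = id kv
      rw [pvDiff_nil]
      rfl
    rw [List.map_congr_left h, List.map_id]
  rw [hmapid]
  rfl
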